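-- pv_equiv track=rewrite | github.com/zhangmozhe/Deep-Exemplar-based-Video-Colorization | utils/~model_util.py | _vgg_make_conv_layer_names
-- ===== SOURCE A (Python) =====
-- def _vgg_make_conv_layer_names(cfg, batch_norm=False):
--     layers = []
--     block_idx = 1
--     layer_idx = 1
--     for v in cfg:
--         if v == "M":
--             layers += ["pool%d" % block_idx]
--             block_idx += 1
--             layer_idx = 1
--         else:
--             if batch_norm:
--                 layers += [
--                     "conv%d_%d" % (block_idx, layer_idx),
--                     "conv%d_%dnorm" % (block_idx, layer_idx),
--                     "relu%d_%d" % (block_idx, layer_idx),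
--                 ]
--             else:
--                 layers += ["conv%d_%d" % (block_idx, layer_idx), "relu%d_%d" % (block_idx, layer_idx)]
--             layer_idx += 1
--     return layers
-- ===== SOURCE B (Python) =====
-- def _block_names(b, n, batch_norm):
--     names = []
--     for l in range(1, n + 1):
--         if batch_norm:
--             names += ["conv%d_%d" % (b, l), "conv%d_%dnorm" % (b, l), "relu%d_%d" % (b, l)]
--         else:
--             names += ["conv%d_%d" % (b, l), "relu%d_%d" % (b, l)]
--     return names
--
--
-- def _vgg_make_conv_layer_names(cfg, batch_norm=False):
--     # Split cfg into blocks: each "M" closes the current block (possibly empty);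
--     # whatever follows the last "M" is a trailing block with no pool.
--     blocks, cur = [], []
--     for v in cfg:
--         if v == "M":
--             blocks.append(cur)
--             cur = []
--         else:
--             cur.append(v)
--     out = []
--     for b, block in enumerate(blocks, 1):
--         out += _block_names(b, len(block), batch_norm)
--         out.append("pool%d" % b)
--     out += _block_names(len(blocks) + 1, len(cur), batch_norm)
--     return out
-- ===== Notes on version B (the rewrite author's own statement) =====
-- stated objective: alternative
-- what changed: Replaces the single loop with manually reset block/layer counters by a grouping pass that splits cfg into 'M'-separated blocks, then emits each block's conv/relu names via a per-block helper with 1-based enumeration, appending pool%d after each closed block and none after the trailing block.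
import Mathlib
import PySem

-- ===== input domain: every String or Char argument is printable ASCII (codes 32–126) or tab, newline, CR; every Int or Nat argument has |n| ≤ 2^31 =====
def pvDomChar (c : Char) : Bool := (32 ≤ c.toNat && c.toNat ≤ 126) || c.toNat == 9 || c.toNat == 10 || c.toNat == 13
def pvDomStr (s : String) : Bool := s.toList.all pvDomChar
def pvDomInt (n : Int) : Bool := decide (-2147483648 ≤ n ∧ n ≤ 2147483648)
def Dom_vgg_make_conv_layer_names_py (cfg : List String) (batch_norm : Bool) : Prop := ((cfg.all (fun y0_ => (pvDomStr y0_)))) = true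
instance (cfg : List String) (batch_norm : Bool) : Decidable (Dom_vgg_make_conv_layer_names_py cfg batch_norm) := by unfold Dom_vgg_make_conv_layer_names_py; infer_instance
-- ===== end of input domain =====

-- B replaces A's single loop with manually reset counters by a grouping pass (split cfg into
-- 'M'-separated blocks) plus per-block enumeration; same O(n) cost, different decomposition.


-- ===== PORT A =====
-- loop body of A: state = (layers, block_idx, layer_idx)
def pvStepA (batch_norm : Bool) (st : List String × Int × Int) (v : String) : List String × Int × Int :=
  if v == "M" then
    (st.1 ++ ["pool" ++ PySem.Int.toStr st.2.1], st.2.1 + 1, 1)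
  else
    (if batch_norm then
      st.1 ++ ["conv" ++ PySem.Int.toStr st.2.1 ++ "_" ++ PySem.Int.toStr st.2.2,
               "conv" ++ PySem.Int.toStr st.2.1 ++ "_" ++ PySem.Int.toStr st.2.2 ++ "norm",
               "relu" ++ PySem.Int.toStr st.2.1 ++ "_" ++ PySem.Int.toStr st.2.2]
     else
      st.1 ++ ["conv" ++ PySem.Int.toStr st.2.1 ++ "_" ++ PySem.Int.toStr st.2.2,
               "relu" ++ PySem.Int.toStr st.2.1 ++ "_" ++ PySem.Int.toStr st.2.2],
     st.2.1, st.2.2 + 1)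

def vgg_make_conv_layer_names_py (cfg : List String) (batch_norm : Bool) : List String :=
  (cfg.foldl (pvStepA batch_norm) ([], 1, 1)).1

-- ===== PORT B =====
-- helper _block_names of Source B
def pvBlockNamesAlt (b n : Int) (batch_norm : Bool) : List String :=
  (PySem.List.pyRange 1 (n + 1) 1).foldl (fun names l =>
    if batch_norm then
      names ++ ["conv" ++ PySem.Int.toStr b ++ "_" ++ PySem.Int.toStr l,
                "conv" ++ PySem.Int.toStr b ++ "_" ++ PySem.Int.toStr l ++ "norm",
                "relu" ++ PySem.Int.toStr b ++ "_" ++ PySem.Int.toStr l]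
    else
      names ++ ["conv" ++ PySem.Int.toStr b ++ "_" ++ PySem.Int.toStr l,
                "relu" ++ PySem.Int.toStr b ++ "_" ++ PySem.Int.toStr l]) []

-- splitting loop body: state = (blocks, cur)
def pvStepS (st : List (List String) × List String) (v : String) : List (List String) × List String :=
  if v == "M" then (st.1 ++ [st.2], []) else (st.1, st.2 ++ [v])

-- emission loop body over enumerate(blocks, 1)
def pvStepE (batch_norm : Bool) (out : List String) (p : Int × List String) : List String :=
  (out ++ pvBlockNamesAlt p.1 (p.2.length : Int) batch_norm) ++ ["pool" ++ PySem.Int.toStr p.1]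

def vgg_make_conv_layer_names_py_alt (cfg : List String) (batch_norm : Bool) : List String :=
  ((PySem.List.enumerate (cfg.foldl pvStepS ([], [])).1 1).foldl (pvStepE batch_norm) [])
    ++ pvBlockNamesAlt (((cfg.foldl pvStepS ([], [])).1.length : Int) + 1)
         ((cfg.foldl pvStepS ([], [])).2.length : Int) batch_norm

-- ===== PRECONDITION & SPEC =====
def Spec_vgg_make_conv_layer_names_py (cfg : List String) (batch_norm : Bool) (out : List String) : Prop := out = vgg_make_conv_layer_names_py_alt cfg batch_norm
instance (cfg : List String) (batch_norm : Bool) (out : List String) : Decidable (Spec_vgg_make_conv_layer_names_py cfg batch_norm out) := by unfold Spec_vgg_make_conv_layer_names_py; infer_instance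

-- ===== CLAIM (what is proved, stated in full; the proofs are below) =====
def Claim_equal_vgg_make_conv_layer_names_py : Prop := ∀ (cfg : List String) (batch_norm : Bool), Dom_vgg_make_conv_layer_names_py cfg batch_norm → Spec_vgg_make_conv_layer_names_py cfg batch_norm (vgg_make_conv_layer_names_py cfg batch_norm)

-- ===== LEMMAS AND PROOFS =====

-- the conv/relu name group for block b, layer l
def pvCvs (batch_norm : Bool) (b l : Int) : List String :=
  if batch_norm then
    ["conv" ++ PySem.Int.toStr b ++ "_" ++ PySem.Int.toStr l,
     "conv" ++ PySem.Int.toStr b ++ "_" ++ PySem.Int.toStr l ++ "norm",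
     "relu" ++ PySem.Int.toStr b ++ "_" ++ PySem.Int.toStr l]
  else
    ["conv" ++ PySem.Int.toStr b ++ "_" ++ PySem.Int.toStr l,
     "relu" ++ PySem.Int.toStr b ++ "_" ++ PySem.Int.toStr l]

-- the suffix A's loop still emits from state (·, b, l)
def pvSuffA (batch_norm : Bool) : List String → Int → Int → List String
  | [], _, _ => []
  | v :: t, b, l =>
    if v == "M" then ("pool" ++ PySem.Int.toStr b) :: pvSuffA batch_norm t (b + 1) 1
    else pvCvs batch_norm b l ++ pvSuffA batch_norm t b (l + 1)

-- recursive form of the splitting pass, starting with current block cur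
def pvSplitFrom : List String → List String → List (List String) × List String
  | cur, [] => ([], cur)
  | cur, v :: t =>
    if v == "M" then
      let r := pvSplitFrom [] t
      (cur :: r.1, r.2)
    else pvSplitFrom (cur ++ [v]) t

-- recursive form of the emission over closed blocks, starting at block number k
def pvEmitClosed (batch_norm : Bool) : Int → List (List String) → List String
  | _, [] => []
  | k, blk :: bs =>
    pvBlockNamesAlt k (blk.length : Int) batch_norm ++ ["pool" ++ PySem.Int.toStr k]
      ++ pvEmitClosed batch_norm (k + 1) bs

theorem pvFoldA_eq (batch_norm : Bool) :
    ∀ (cfg acc : List String) (b l : Int),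
      (cfg.foldl (pvStepA batch_norm) (acc, b, l)).1 = acc ++ pvSuffA batch_norm cfg b l := by
  intro cfg
  induction cfg with
  | nil => intro acc b l; simp [pvSuffA]
  | cons v t ih =>
    intro acc b l
    by_cases h : v == "M"
    · simp [List.foldl_cons, pvStepA, h, pvSuffA, ih]
    · cases batch_norm <;> simp [List.foldl_cons, pvStepA, h, pvSuffA, pvCvs, ih]

theorem pvFoldS_eq :
    ∀ (cfg : List String) (blocks : List (List String)) (cur : List String),
      cfg.foldl pvStepS (blocks, cur)
        = (blocks ++ (pvSplitFrom cur cfg).1, (pvSplitFrom cur cfg).2) := by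
  intro cfg
  induction cfg with
  | nil => intro blocks cur; simp [pvSplitFrom]
  | cons v t ih =>
    intro blocks cur
    by_cases h : v == "M"
    · simp [List.foldl_cons, pvStepS, h, pvSplitFrom, ih]
    · simp [List.foldl_cons, pvStepS, h, pvSplitFrom, ih]

theorem pvFoldE_eq (batch_norm : Bool) :
    ∀ (bs : List (List String)) (k : Int) (out : List String),
      (PySem.List.enumerate bs k).foldl (pvStepE batch_norm) out
        = out ++ pvEmitClosed batch_norm k bs := by
  intro bs
  induction bs with
  | nil => intro k out; simp [PySem.List.enumerate_nil, pvEmitClosed]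
  | cons blk t ih =>
    intro k out
    simp [PySem.List.enumerate_cons, List.foldl_cons, pvStepE, pvEmitClosed, ih]

theorem pvBlockNames_flatMap (batch_norm : Bool) (b n : Int) :
    pvBlockNamesAlt b n batch_norm
      = (PySem.List.pyRange 1 (n + 1) 1).flatMap (pvCvs batch_norm b) := by
  have h : (fun (names : List String) (l : Int) =>
      if batch_norm then
        names ++ ["conv" ++ PySem.Int.toStr b ++ "_" ++ PySem.Int.toStr l,
                  "conv" ++ PySem.Int.toStr b ++ "_" ++ PySem.Int.toStr l ++ "norm",
                  "relu" ++ PySem.Int.toStr b ++ "_" ++ PySem.Int.toStr l]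
      else
        names ++ ["conv" ++ PySem.Int.toStr b ++ "_" ++ PySem.Int.toStr l,
                  "relu" ++ PySem.Int.toStr b ++ "_" ++ PySem.Int.toStr l])
      = fun names l => names ++ pvCvs batch_norm b l := by
    cases batch_norm <;> rfl
  rw [pvBlockNamesAlt, h, PySem.List.foldl_append_eq_flatMap, List.nil_append]

theorem pvBlockNames_zero (batch_norm : Bool) (b : Int) :
    pvBlockNamesAlt b (0 : Int) batch_norm = [] := by
  rw [pvBlockNames_flatMap]
  simp [PySem.List.pyRange_one_eq_nil]

theorem pvBlockNames_succ (batch_norm : Bool) (b : Int) (n : Nat) :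
    pvBlockNamesAlt b ((n : Int) + 1) batch_norm
      = pvBlockNamesAlt b (n : Int) batch_norm ++ pvCvs batch_norm b ((n : Int) + 1) := by
  rw [pvBlockNames_flatMap, pvBlockNames_flatMap]
  have h1 : (1 : Int) ≤ (n : Int) + 1 := by omega
  rw [PySem.List.pyRange_one_succ_right h1, List.flatMap_append]
  simp

theorem pvMain (batch_norm : Bool) :
    ∀ (cfg : List String) (b : Int) (cur : List String),
      pvBlockNamesAlt b (cur.length : Int) batch_norm ++ pvSuffA batch_norm cfg b ((cur.length : Int) + 1)
        = pvEmitClosed batch_norm b (pvSplitFrom cur cfg).1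
            ++ pvBlockNamesAlt (b + ((pvSplitFrom cur cfg).1.length : Int))
                 ((pvSplitFrom cur cfg).2.length : Int) batch_norm := by
  intro cfg
  induction cfg with
  | nil => intro b cur; simp [pvSplitFrom, pvSuffA, pvEmitClosed]
  | cons v t ih =>
    intro b cur
    by_cases h : v == "M"
    · rw [pvSuffA, pvSplitFrom]
      simp only [h, if_pos]
      rw [pvEmitClosed]
      have ih' := ih (b + 1) []
      simp only [List.length_nil, Nat.cast_zero, zero_add] at ih'
      rw [pvBlockNames_zero, List.nil_append] at ih'
      have hb : b + (((cur :: (pvSplitFrom [] t).1).length : Nat) : Int)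
          = (b + 1) + (((pvSplitFrom [] t).1.length : Nat) : Int) := by
        push_cast [List.length_cons]; ring
      rw [hb]
      simp [ih']
    · rw [pvSuffA, pvSplitFrom]
      simp only [h, if_neg, Bool.false_eq_true, not_false_iff]
      have ih' := ih b (cur ++ [v])
      have hlen : ((cur ++ [v]).length : Int) = (cur.length : Int) + 1 := by
        simp
      rw [hlen] at ih'
      rw [← ih', pvBlockNames_succ]
      simp [List.append_assoc]

-- ===== VERDICT (by name: the statement is the Claim_ definition above) =====
theorem vgg_make_conv_layer_names_py_spec : Claim_equal_vgg_make_conv_layer_names_py := by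
  intro cfg batch_norm _
  unfold Spec_vgg_make_conv_layer_names_py vgg_make_conv_layer_names_py vgg_make_conv_layer_names_py_alt
  rw [pvFoldA_eq batch_norm cfg [] 1 1, List.nil_append]
  rw [pvFoldS_eq cfg [] [], pvFoldE_eq]
  have hm := pvMain batch_norm cfg 1 []
  simp only [List.length_nil, Nat.cast_zero, zero_add] at hm
  rw [pvBlockNames_zero, List.nil_append] at hm
  have hc : (1 : Int) + ((pvSplitFrom [] cfg).1.length : Int)
      = ((pvSplitFrom [] cfg).1.length : Int) + 1 := by ring
  rw [hc] at hm
  simpa using hm
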